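-- pv_equiv track=rewrite | github.com/DeepLeau/Ultimate_tic_tac_toe | morpion-ultimate.py | grille_possible
-- ===== SOURCE A (Python) =====
-- def grille_possible(dernier_mouvement):
--     y = dernier_mouvement
--     morpion1 = [9*i for i in range(0,9)]
--     morpion2 = [9*i + 1 for i in range(0,9)]
--     morpion3 = [9*i + 2 for i in range(0,9)]
--     morpion4 = [9*i + 3 for i in range(0,9)]
--     morpion5 = [9*i + 4 for i in range(0,9)]
--     morpion6 = [9*i + 5  for i in range(0,9)]
--     morpion7 = [9*i + 6  for i in range(0,9)]
--     morpion8 = [9*i + 7 for i in range(0,9)]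
--     morpion9 = [9*i + 8 for i in range(0,9)]
--
--     if y in morpion1:
--         return 0
--     if y in morpion2:
--         return 1
--     if y in morpion3:
--         return 2
--     if y in morpion4:
--         return 3
--     if y in morpion5:
--         return 4
--     if y in morpion6:
--         return 5
--     if y in morpion7:
--         return 6
--     if y in morpion8:
--         return 7
--     if y in morpion9:
--         return 8
--     else :
--         return 1000
-- ===== SOURCE B (Python) =====
-- def grille_possible(dernier_mouvement):
--     # closed form: indices 0..80 map to their column (index mod 9), anything else -> 1000
--     if dernier_mouvement in range(81):
--         return int(dernier_mouvement) % 9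
--     return 1000
-- ===== Notes on version B (the rewrite author's own statement) =====
-- stated objective: simpler
-- what changed: Replaces the nine precomputed index lists and nine successive membership scans with one range guard and a single modulo computation.
import Mathlib
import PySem

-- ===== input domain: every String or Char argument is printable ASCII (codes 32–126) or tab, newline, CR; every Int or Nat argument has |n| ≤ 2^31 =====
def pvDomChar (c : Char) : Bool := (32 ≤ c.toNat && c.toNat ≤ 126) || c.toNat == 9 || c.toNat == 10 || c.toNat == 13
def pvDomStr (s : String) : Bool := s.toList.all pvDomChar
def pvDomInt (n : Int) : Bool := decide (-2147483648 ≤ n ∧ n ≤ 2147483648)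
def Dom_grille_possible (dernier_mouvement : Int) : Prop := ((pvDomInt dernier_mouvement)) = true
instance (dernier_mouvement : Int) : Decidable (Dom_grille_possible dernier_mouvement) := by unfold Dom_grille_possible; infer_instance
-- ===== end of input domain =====

-- B replaces A's nine precomputed lists and nine membership scans with one range guard and a modulo (objective: simpler).


-- ===== PORT A =====
def grille_possible (dernier_mouvement : Int) : Int :=
  let y := dernier_mouvement
  let morpion1 := (PySem.List.pyRange 0 9 1).map (fun i => 9*i)
  let morpion2 := (PySem.List.pyRange 0 9 1).map (fun i => 9*i + 1)
  let morpion3 := (PySem.List.pyRange 0 9 1).map (fun i => 9*i + 2)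
  let morpion4 := (PySem.List.pyRange 0 9 1).map (fun i => 9*i + 3)
  let morpion5 := (PySem.List.pyRange 0 9 1).map (fun i => 9*i + 4)
  let morpion6 := (PySem.List.pyRange 0 9 1).map (fun i => 9*i + 5)
  let morpion7 := (PySem.List.pyRange 0 9 1).map (fun i => 9*i + 6)
  let morpion8 := (PySem.List.pyRange 0 9 1).map (fun i => 9*i + 7)
  let morpion9 := (PySem.List.pyRange 0 9 1).map (fun i => 9*i + 8)
  if y ∈ morpion1 then 0
  else if y ∈ morpion2 then 1
  else if y ∈ morpion3 then 2
  else if y ∈ morpion4 then 3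
  else if y ∈ morpion5 then 4
  else if y ∈ morpion6 then 5
  else if y ∈ morpion7 then 6
  else if y ∈ morpion8 then 7
  else if y ∈ morpion9 then 8
  else 1000

-- ===== PORT B =====
def grille_possible_alt (dernier_mouvement : Int) : Int :=
  if 0 ≤ dernier_mouvement ∧ dernier_mouvement < 81 then
    PySem.Int.mod dernier_mouvement 9
  else 1000

-- ===== PRECONDITION & SPEC =====
def Spec_grille_possible (dernier_mouvement : Int) (out : Int) : Prop := out = grille_possible_alt dernier_mouvement
instance (dernier_mouvement : Int) (out : Int) : Decidable (Spec_grille_possible dernier_mouvement out) := by unfold Spec_grille_possible; infer_instance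

-- ===== CLAIM (what is proved, stated in full; the proofs are below) =====
def Claim_equal_grille_possible : Prop := ∀ (dernier_mouvement : Int), Dom_grille_possible dernier_mouvement → Spec_grille_possible dernier_mouvement (grille_possible dernier_mouvement)

-- ===== LEMMAS AND PROOFS =====
theorem pyRange09 : PySem.List.pyRange 0 9 1 = [0,1,2,3,4,5,6,7,8] := by decide

-- ===== VERDICT (by name: the statement is the Claim_ definition above) =====
theorem grille_possible_spec : Claim_equal_grille_possible := by
  intro y _
  unfold Spec_grille_possible grille_possible grille_possible_alt
  have hm : PySem.Int.mod y 9 = y % 9 := PySem.Int.mod_eq_emod_of_pos (by norm_num)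
  simp only [pyRange09, List.map, List.mem_cons, List.not_mem_nil, or_false, hm]
  norm_num
  split_ifs <;> omega
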